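-- pv_equiv track=rewrite | github.com/aamirahmad/H-MRI_Search_and_Rescue | traverse_blend_vr/scripts/joinFaces.py | _FindFaceGraphComponents
-- ===== SOURCE A (Python) =====
-- def _FindFaceGraphComponents(faces, face_adj):
--   """Partition faces into connected components.
--
--   Args:
--     faces: list of list of int
--     face_adj: list of list of int - see _GetFaceGraph
--   Returns:
--     (list of list of int, list of int) -
--       first list partitions face indices into separate lists, each a component
--       second list maps face indices into their component index
--   """
--
--   if not faces:
--     return ([], [])
--   components = []
--   ftoc = [ -1 ] * len(faces)
--   for i in range(len(faces)):
--     if ftoc[i] == -1: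
--       compi = len(components)
--       comp = []
--       _FFGCSearch(i, faces, face_adj, ftoc, compi, comp)
--       components.append(comp)
--   return (components, ftoc)
--
-- def _FFGCSearch(findex, faces, face_adj, ftoc, compi, comp):
--   """Depth first search helper function for _FindFaceGraphComponents
--
--   Searches recursively through all faces connected to findex, adding
--   each face found to comp and setting ftoc for that face to compi.
--   """
--
--   comp.append(findex)
--   ftoc[findex] = compi
--   for otherf in face_adj[findex]:
--     if ftoc[otherf] == -1:
--       _FFGCSearch(otherf, faces, face_adj, ftoc, compi, comp)
-- ===== SOURCE B (Python) =====
-- def _FindFaceGraphComponents(faces, face_adj):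
--   """Partition faces into connected components (iterative DFS variant).
--
--   Same contract as the recursive original: returns (components, ftoc).
--   """
--
--   if not faces:
--     return ([], [])
--   components = []
--   ftoc = [ -1 ] * len(faces)
--   for i in range(len(faces)):
--     if ftoc[i] == -1:
--       compi = len(components)
--       comp = []
--       stack = [i]
--       while stack:
--         node = stack.pop()
--         if ftoc[node] != -1:
--           continue
--         ftoc[node] = compi
--         comp.append(node)
--         stack.extend(reversed([o for o in face_adj[node] if ftoc[o] == -1]))
--       components.append(comp)
--   return (components, ftoc)
-- ===== Notes on version B (the rewrite author's own statement) =====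
-- stated objective: idiomatic
-- what changed: The recursive depth-first helper _FFGCSearch is replaced by an explicit stack-based DFS inside the outer loop (pop a node, skip if already labelled, label and push its still-unlabelled neighbours in reverse), reproducing the recursion's pre-order without recursion-depth limits.
-- outside the precondition, e.g. on _FindFaceGraphComponents([[0]], [[-1], [99]]): A returns ([[0]], [0]), B returns ([[0]], [0])
import Mathlib
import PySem

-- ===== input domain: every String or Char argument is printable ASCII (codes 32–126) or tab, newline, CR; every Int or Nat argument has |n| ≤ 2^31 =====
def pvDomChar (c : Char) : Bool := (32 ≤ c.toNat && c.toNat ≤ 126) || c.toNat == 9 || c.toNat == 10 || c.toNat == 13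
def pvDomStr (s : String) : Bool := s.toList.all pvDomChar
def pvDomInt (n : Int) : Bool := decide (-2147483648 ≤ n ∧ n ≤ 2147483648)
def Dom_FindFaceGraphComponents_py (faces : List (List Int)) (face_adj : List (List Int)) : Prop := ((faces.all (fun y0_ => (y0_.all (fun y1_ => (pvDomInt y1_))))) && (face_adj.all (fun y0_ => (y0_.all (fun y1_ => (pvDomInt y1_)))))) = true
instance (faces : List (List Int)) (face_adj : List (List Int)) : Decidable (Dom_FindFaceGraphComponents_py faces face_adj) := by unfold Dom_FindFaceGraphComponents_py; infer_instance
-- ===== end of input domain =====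

-- B replaces the recursive DFS helper by an explicit stack-based DFS (same pre-order); both Pythons mutate only local lists, so return-value equivalence is full equivalence.

-- ===== PORT A =====
-- _FFGCSearch. `fuel` is a port artifact bounding the recursion depth: every call
-- (from the outer loop or recursive) is made on a node whose ftoc cell is -1 and the call
-- immediately overwrites that cell with the non-negative compi, so the depth never exceeds
-- len(faces), the fuel the port supplies; the fuel-0 branch is then unreachable.
-- `ftoc[findex] = compi` is pySetD and `ftoc[otherf] == -1` is `pyGet? … = some (-1)`
-- (exact wherever Python does not raise; Pre_ below excludes the IndexError inputs).
-- compi is always len(components), hence a Nat.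
def FFGCSearch (face_adj : List (List Int)) (compi : Nat) :
    Nat → Int → List Int → List Int → List Int × List Int
  | 0, findex, ftoc, comp => (PySem.List.pySetD ftoc findex (compi : Int), comp ++ [findex])
  | fuel+1, findex, ftoc, comp =>
      ((PySem.List.pyGet? face_adj findex).getD []).foldl
        (fun st otherf =>
          if PySem.List.pyGet? st.1 otherf = some (-1) then
            FFGCSearch face_adj compi fuel otherf st.1 st.2
          else st)
        (PySem.List.pySetD ftoc findex (compi : Int), comp ++ [findex])

-- _FindFaceGraphComponents: outer loop over range(len(faces)), state (components, ftoc)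
def FindFaceGraphComponents_py (faces : List (List Int)) (face_adj : List (List Int)) : List (List Int) × List Int :=
  if faces = [] then ([], [])
  else
    (PySem.List.pyRange 0 (faces.length : Int) 1).foldl
      (fun st i =>
        if PySem.List.pyGet? st.2 i = some (-1) then
          let r := FFGCSearch face_adj st.1.length faces.length i st.2 []
          (st.1 ++ [r.2], r.1)
        else st)
      ([], List.replicate faces.length (-1))

-- ===== PORT B =====
-- termination helper for the stack loop: marking a -1 cell strictly lowers the number of -1 cells
theorem pv_count_pySetD_lt (ftoc : List Int) (i v : Int) (h : PySem.List.pyGet? ftoc i = some (-1))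
    (hv : v ≠ -1) : (PySem.List.pySetD ftoc i v).count (-1) < ftoc.count (-1) := by
  unfold PySem.List.pyGet? at h
  cases hk : PySem.List.pyIdx? ftoc.length i with
  | none => rw [hk] at h; simp at h
  | some k =>
    rw [hk] at h
    have h2 : ftoc[k]? = some (-1) := h
    obtain ⟨hklt, hgv⟩ := List.getElem?_eq_some_iff.mp h2
    have hset : PySem.List.pySetD ftoc i v = ftoc.set k v := by
      simp [PySem.List.pySetD, PySem.List.pySet?, hk]
    have hc1 : 0 < ftoc.count (-1) :=
      List.count_pos_iff.mpr (hgv ▸ ftoc.getElem_mem hklt)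
    rw [hset, List.count_set hklt, hgv]
    simp only [beq_self_eq_true, if_true, beq_iff_eq, hv, if_false]
    omega

-- the stack-based DFS of B. The Lean stack keeps Python's top (the popped end) at the
-- head: Python's `stack.extend(reversed(filtered))` followed by pop-from-end is
-- `filtered ++ rest` in that representation.
def FFGCStack (face_adj : List (List Int)) (compi : Nat) :
    List Int → List Int → List Int → List Int × List Int
  | [], ftoc, comp => (ftoc, comp)
  | node :: rest, ftoc, comp =>
      if h : PySem.List.pyGet? ftoc node = some (-1) then
        FFGCStack face_adj compi
          ((((PySem.List.pyGet? face_adj node).getD []).filter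
              (fun o => decide (PySem.List.pyGet? (PySem.List.pySetD ftoc node (compi : Int)) o = some (-1)))) ++ rest)
          (PySem.List.pySetD ftoc node (compi : Int)) (comp ++ [node])
      else FFGCStack face_adj compi rest ftoc comp
  termination_by stack ftoc _ => (ftoc.count (-1), stack.length)
  decreasing_by
  · exact Prod.Lex.left _ _ (pv_count_pySetD_lt ftoc node (compi : Int) h (by omega))
  · exact Prod.Lex.right _ (by simp)

def FindFaceGraphComponents_py_alt (faces : List (List Int)) (face_adj : List (List Int)) : List (List Int) × List Int :=
  if faces = [] then ([], [])
  else
    (PySem.List.pyRange 0 (faces.length : Int) 1).foldl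
      (fun st i =>
        if PySem.List.pyGet? st.2 i = some (-1) then
          let r := FFGCStack face_adj st.1.length [i] st.2 []
          (st.1 ++ [r.2], r.1)
        else st)
      ([], List.replicate faces.length (-1))

-- ===== PRECONDITION & SPEC =====
-- Pre_ admits: empty faces (adjacency never touched); an adjacency table of exactly
-- len(faces) rows whose entries lie in [-len(faces), len(faces)); or a longer table whose
-- first len(faces) rows have entries in [0, len(faces)) (extra rows are never reached).
-- Outside this A raises IndexError, except when out-of-range entries sit only in extra
-- rows that negative-index wraparound happens not to reach — there A and B return the
-- same value but the input is still excluded. (The ports themselves agree on ALL inputs;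
-- Pre_ only marks inputs where the Pythons return instead of raising.)
def Pre_FindFaceGraphComponents_py (faces : List (List Int)) (face_adj : List (List Int)) : Prop :=
  faces = [] ∨
    (face_adj.length = faces.length ∧
      ∀ row ∈ face_adj, ∀ j ∈ row, -(faces.length : Int) ≤ j ∧ j < (faces.length : Int)) ∨
    (faces.length ≤ face_adj.length ∧
      ∀ row ∈ face_adj.take faces.length, ∀ j ∈ row, 0 ≤ j ∧ j < (faces.length : Int))
instance (faces : List (List Int)) (face_adj : List (List Int)) : Decidable (Pre_FindFaceGraphComponents_py faces face_adj) := by unfold Pre_FindFaceGraphComponents_py; infer_instance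
def pvWitness_FindFaceGraphComponents_py : List (List Int) × List (List Int) := ([[0, 1], [1, 2], [2, 0]], [[1], [0, 2], []])

def Spec_FindFaceGraphComponents_py (faces : List (List Int)) (face_adj : List (List Int)) (out : List (List Int) × List Int) : Prop := out = FindFaceGraphComponents_py_alt faces face_adj
instance (faces : List (List Int)) (face_adj : List (List Int)) (out : List (List Int) × List Int) : Decidable (Spec_FindFaceGraphComponents_py faces face_adj out) := by unfold Spec_FindFaceGraphComponents_py; infer_instance

-- ===== CLAIM (what is proved, stated in full; the proofs are below) =====
def Claim_equal_FindFaceGraphComponents_py : Prop := ∀ (faces : List (List Int)) (face_adj : List (List Int)), Dom_FindFaceGraphComponents_py faces face_adj → Pre_FindFaceGraphComponents_py faces face_adj → Spec_FindFaceGraphComponents_py faces face_adj (FindFaceGraphComponents_py faces face_adj)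

-- ===== LEMMAS AND PROOFS =====

-- the single visit step A's loops perform: the ftoc check of the call site folded into the call
def pvVisit (fa : List (List Int)) (c fuel : Nat) (n : Int) (st : List Int × List Int) :
    List Int × List Int :=
  if PySem.List.pyGet? st.1 n = some (-1) then FFGCSearch fa c fuel n st.1 st.2 else st

theorem pv_search_succ (fa : List (List Int)) (c fuel : Nat) (n : Int) (ftoc comp : List Int) :
    FFGCSearch fa c (fuel+1) n ftoc comp
      = ((PySem.List.pyGet? fa n).getD []).foldl (fun st o => pvVisit fa c fuel o st)
          (PySem.List.pySetD ftoc n (c : Int), comp ++ [n]) := by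
  simp [FFGCSearch, pvVisit]

-- "ftoc' is ftoc after some non-(-1) writes": same length, -1 cells only disappear, count shrinks
def pvInv (l' l : List Int) : Prop :=
  l'.length = l.length ∧
    (∀ m : Int, PySem.List.pyGet? l' m = some (-1) → PySem.List.pyGet? l m = some (-1)) ∧
    l'.count (-1) ≤ l.count (-1)

theorem pvInv_refl (l : List Int) : pvInv l l := ⟨rfl, fun _ h => h, le_refl _⟩

theorem pvInv_trans {a b c : List Int} (h1 : pvInv a b) (h2 : pvInv b c) : pvInv a c :=
  ⟨h1.1.trans h2.1, fun m hm => h2.2.1 m (h1.2.1 m hm), le_trans h1.2.2 h2.2.2⟩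

theorem pvInv_set (l : List Int) (i v : Int) (hv : v ≠ -1) :
    pvInv (PySem.List.pySetD l i v) l := by
  cases hk : PySem.List.pyIdx? l.length i with
  | none =>
    have : PySem.List.pySetD l i v = l := by simp [PySem.List.pySetD, PySem.List.pySet?, hk]
    rw [this]; exact pvInv_refl l
  | some k =>
    have hset : PySem.List.pySetD l i v = l.set k v := by
      simp [PySem.List.pySetD, PySem.List.pySet?, hk]
    rw [hset]
    refine ⟨List.length_set .., ?_, ?_⟩
    · intro m hm
      unfold PySem.List.pyGet? at hm ⊢
      rw [List.length_set] at hm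
      cases hm' : PySem.List.pyIdx? l.length m with
      | none => rw [hm'] at hm; simp at hm
      | some j =>
        rw [hm'] at hm
        have hm2 : (l.set k v)[j]? = some (-1) := hm
        show l[j]? = some (-1)
        rw [List.getElem?_set] at hm2
        by_cases hkj : k = j
        · rw [if_pos hkj] at hm2
          split at hm2
          · exact absurd (Option.some.inj hm2) hv
          · exact absurd hm2 (by simp)
        · rwa [if_neg hkj] at hm2
    · by_cases hklt : k < l.length
      · rw [List.count_set hklt]
        split_ifs with h1 h2 h3
        · exact absurd (by simpa using h2) hv
        · omega
        · exact absurd (by simpa using h3) hv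
        · omega
      · rw [List.set_eq_of_length_le (by omega)]

theorem pv_foldl_visit_inv (fa : List (List Int)) (c fuel : Nat)
    (hstep : ∀ (st : List Int × List Int) (o : Int), pvInv (pvVisit fa c fuel o st).1 st.1) :
    ∀ (l : List Int) (st : List Int × List Int),
      pvInv ((l.foldl (fun st o => pvVisit fa c fuel o st) st).1) st.1 := by
  intro l
  induction l with
  | nil => intro st; exact pvInv_refl _
  | cons o l ih =>
    intro st
    exact pvInv_trans (ih (pvVisit fa c fuel o st)) (hstep st o)

theorem pv_search_inv (fa : List (List Int)) (c : Nat) :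
    ∀ (fuel : Nat) (n : Int) (ftoc comp : List Int),
      pvInv (FFGCSearch fa c fuel n ftoc comp).1 ftoc := by
  intro fuel
  induction fuel with
  | zero => intro n ftoc comp; exact pvInv_set ftoc n (c : Int) (by omega)
  | succ fuel ih =>
    intro n ftoc comp
    rw [pv_search_succ]
    refine pvInv_trans (pv_foldl_visit_inv fa c fuel ?_ _ _) (pvInv_set ftoc n (c : Int) (by omega))
    intro st o
    unfold pvVisit
    split
    · exact ih o st.1 st.2
    · exact pvInv_refl _

theorem pv_visit_inv (fa : List (List Int)) (c fuel : Nat) (o : Int) (st : List Int × List Int) :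
    pvInv (pvVisit fa c fuel o st).1 st.1 := by
  unfold pvVisit
  split
  · exact pv_search_inv fa c fuel o st.1 st.2
  · exact pvInv_refl _

-- skipping the push-time filter is sound: a cell that is not -1 stays not -1 through visits
theorem pv_foldl_visit_filter (fa : List (List Int)) (c fuel : Nat) (ftoc0 : List Int) :
    ∀ (l : List Int) (st : List Int × List Int),
      (∀ m : Int, PySem.List.pyGet? st.1 m = some (-1) → PySem.List.pyGet? ftoc0 m = some (-1)) →
      (l.filter (fun o => decide (PySem.List.pyGet? ftoc0 o = some (-1)))).foldl
          (fun st o => pvVisit fa c fuel o st) st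
        = l.foldl (fun st o => pvVisit fa c fuel o st) st := by
  intro l
  induction l with
  | nil => intro st _; rfl
  | cons o l ih =>
    intro st h
    by_cases ho : PySem.List.pyGet? ftoc0 o = some (-1)
    · rw [List.filter_cons_of_pos (by simpa using ho), List.foldl_cons, List.foldl_cons]
      exact ih (pvVisit fa c fuel o st)
        (fun m hm => h m ((pv_visit_inv fa c fuel o st).2.1 m hm))
    · rw [List.filter_cons_of_neg (by simpa using ho), List.foldl_cons]
      have hv : pvVisit fa c fuel o st = st := by
        unfold pvVisit
        rw [if_neg (fun hc => ho (h o hc))]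
      rw [hv]
      exact ih st h

-- the master lemma: popping the stack performs exactly A's sequence of visits
theorem pv_master (fa : List (List Int)) (c : Nat) (μ : Nat) :
    ∀ (fuel : Nat), μ ≤ fuel → ∀ (l ftoc comp rest : List Int), ftoc.count (-1) ≤ μ →
      FFGCStack fa c (l ++ rest) ftoc comp
        = (fun st => FFGCStack fa c rest st.1 st.2)
            (l.foldl (fun st o => pvVisit fa c fuel o st) (ftoc, comp)) := by
  induction μ using Nat.strong_induction_on with
  | _ μ IH =>
    intro fuel hμf l
    induction l generalizing fuel with
    | nil => intro ftoc comp rest _; rfl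
    | cons n l ihl =>
      intro ftoc comp rest hc
      by_cases hg : PySem.List.pyGet? ftoc n = some (-1)
      · have hc1 : 0 < ftoc.count (-1) :=
          List.count_pos_iff.mpr (PySem.List.mem_of_pyGet?_eq_some _ hg)
        have hμ1 : 1 ≤ μ := le_trans hc1 hc
        obtain ⟨fuel', rfl⟩ : ∃ f', fuel = f' + 1 := ⟨fuel - 1, by omega⟩
        have hcount' : (PySem.List.pySetD ftoc n (c : Int)).count (-1) ≤ μ - 1 := by
          have := pv_count_pySetD_lt ftoc n (c : Int) hg (by omega)
          omega
        rw [List.cons_append, FFGCStack, dif_pos hg]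
        rw [IH (μ - 1) (by omega) fuel' (by omega) _ _ _ _ hcount']
        rw [pv_foldl_visit_filter fa c fuel' _ _ _ (fun m hm => hm)]
        rw [← pv_search_succ]
        rw [List.foldl_cons]
        have hvis : pvVisit fa c (fuel' + 1) n (ftoc, comp) = FFGCSearch fa c (fuel' + 1) n ftoc comp := by
          unfold pvVisit; rw [if_pos hg]
        rw [hvis]
        have hcnt2 : (FFGCSearch fa c (fuel' + 1) n ftoc comp).1.count (-1) ≤ μ :=
          le_trans (pv_search_inv fa c (fuel' + 1) n ftoc comp).2.2 hc
        exact ihl (fuel' + 1) hμf _ _ rest hcnt2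
      · rw [List.cons_append, FFGCStack, dif_neg hg]
        rw [List.foldl_cons]
        have hvis : pvVisit fa c fuel n (ftoc, comp) = (ftoc, comp) := by
          unfold pvVisit; rw [if_neg hg]
        rw [hvis]
        exact ihl fuel hμf ftoc comp rest hc

theorem pv_stack_nil (fa : List (List Int)) (c : Nat) (ftoc comp : List Int) :
    FFGCStack fa c [] ftoc comp = (ftoc, comp) := by
  rw [FFGCStack]

-- a single seeded stack run is a single recursive search
theorem pv_seed (fa : List (List Int)) (c flen : Nat) (i : Int) (ftoc : List Int)
    (hlen : ftoc.length = flen) (hg : PySem.List.pyGet? ftoc i = some (-1)) :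
    FFGCStack fa c [i] ftoc [] = FFGCSearch fa c flen i ftoc [] := by
  have h := pv_master fa c flen flen (le_refl _) [i] ftoc [] []
    (by rw [← hlen]; exact ftoc.count_le_length)
  simp only [List.foldl_cons, List.foldl_nil] at h
  rw [show ([i] ++ [] : List Int) = [i] from rfl] at h
  rw [h]
  unfold pvVisit
  rw [if_pos hg]
  rw [pv_stack_nil]

-- the two outer loops agree step by step
theorem pv_outer (fa : List (List Int)) (flen : Nat) :
    ∀ (l : List Int) (st : List (List Int) × List Int), st.2.length = flen →
      l.foldl
        (fun st i =>
          if PySem.List.pyGet? st.2 i = some (-1) then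
            let r := FFGCSearch fa st.1.length flen i st.2 []
            (st.1 ++ [r.2], r.1)
          else st) st
      = l.foldl
        (fun st i =>
          if PySem.List.pyGet? st.2 i = some (-1) then
            let r := FFGCStack fa st.1.length [i] st.2 []
            (st.1 ++ [r.2], r.1)
          else st) st := by
  intro l
  induction l with
  | nil => intro st _; rfl
  | cons i l ih =>
    intro st hlen
    rw [List.foldl_cons, List.foldl_cons]
    by_cases hg : PySem.List.pyGet? st.2 i = some (-1)
    · have hseed := pv_seed fa st.1.length flen i st.2 hlen hg
      simp only [if_pos hg, hseed]
      exact ih _ (by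
        simpa using ((pv_search_inv fa st.1.length flen i st.2 []).1.trans hlen))
    · simp only [if_neg hg]
      exact ih st hlen

-- ===== VERDICT (by name: the statement is the Claim_ definition above) =====
theorem FindFaceGraphComponents_py_spec : Claim_equal_FindFaceGraphComponents_py := by
  intro faces face_adj _ _
  unfold Spec_FindFaceGraphComponents_py
  unfold FindFaceGraphComponents_py FindFaceGraphComponents_py_alt
  by_cases hf : faces = []
  · rw [if_pos hf, if_pos hf]
  · rw [if_neg hf, if_neg hf]
    exact pv_outer face_adj faces.length _ _ (by simp)
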